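-- pv_equiv track=rewrite | github.com/QoroQuantum/divi | divi/qprog/problems/_matching.py | is_valid_matching
-- ===== SOURCE A (Python) =====
-- def is_valid_matching(edges: list[tuple]) -> bool:
--     """Check that no node appears in more than one selected edge."""
--     seen: set = set()
--     for u, v in edges:
--         if u in seen or v in seen:
--             return False
--         seen.add(u)
--         seen.add(v)
--     return True
-- ===== SOURCE B (Python) =====
-- def is_valid_matching(edges: list[tuple]) -> bool:
--     """Check that no node appears in more than one selected edge."""
--     counts = {}
--     for u, v in edges:
--         for node in {u, v}:
--             counts[node] = counts.get(node, 0) + 1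
--     return all(c <= 1 for c in counts.values())
-- ===== Notes on version B (the rewrite author's own statement) =====
-- stated objective: alternative
-- what changed: A is a single early-exit pass over edges maintaining a 'seen' set and returning False at the first repeated node; B instead tabulates, over the whole input, how many edges each node belongs to (counting each edge's endpoint set {u, v}) and decides validity afterwards by checking every count is at most 1.
import Mathlib
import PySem

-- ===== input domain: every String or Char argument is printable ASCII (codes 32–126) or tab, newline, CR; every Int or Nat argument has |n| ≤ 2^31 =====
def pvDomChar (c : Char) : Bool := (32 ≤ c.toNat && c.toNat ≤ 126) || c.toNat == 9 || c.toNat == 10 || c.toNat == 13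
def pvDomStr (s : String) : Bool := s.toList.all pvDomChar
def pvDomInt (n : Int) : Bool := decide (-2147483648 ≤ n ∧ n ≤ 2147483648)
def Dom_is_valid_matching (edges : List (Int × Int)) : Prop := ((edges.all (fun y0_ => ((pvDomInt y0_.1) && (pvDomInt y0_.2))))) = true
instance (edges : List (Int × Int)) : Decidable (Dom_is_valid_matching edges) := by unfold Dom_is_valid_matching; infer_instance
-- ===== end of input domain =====

-- B replaces A's early-exit seen-set scan with a full tabulation of how many edges each node belongs to (per-edge endpoint set {u,v}), then checks all counts ≤ 1 (alternative decomposition, same O(n) cost).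


-- ===== PORT A =====
-- the loop 'for u, v in edges' with early return False
def ivmGoA (seen : PySem.Set Int) : List (Int × Int) → Bool
  | [] => true
  | (u, v) :: rest =>
    if PySem.Set.contains seen u || PySem.Set.contains seen v then false
    else ivmGoA (PySem.Set.add (PySem.Set.add seen u) v) rest

def is_valid_matching (edges : List (Int × Int)) : Bool :=
  ivmGoA PySem.Set.empty edges

-- ===== PORT B =====
def is_valid_matching_alt (edges : List (Int × Int)) : Bool :=
  -- counts[node] = counts.get(node, 0) + 1 for each node in the endpoint set {u, v} of each edge
  let counts : PySem.Dict Int Int := edges.foldl (fun counts e =>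
    (PySem.Set.ofList [e.1, e.2]).foldl
      (fun counts node => PySem.Dict.modify counts node 0 (· + 1)) counts)
    PySem.Dict.empty
  -- all(c <= 1 for c in counts.values())
  (PySem.Dict.values counts).all (fun c => c ≤ 1)

-- ===== PRECONDITION & SPEC =====
def Spec_is_valid_matching (edges : List (Int × Int)) (out : Bool) : Prop := out = is_valid_matching_alt edges
instance (edges : List (Int × Int)) (out : Bool) : Decidable (Spec_is_valid_matching edges out) := by unfold Spec_is_valid_matching; infer_instance

-- ===== CLAIM (what is proved, stated in full; the proofs are below) =====
def Claim_equal_is_valid_matching : Prop := ∀ (edges : List (Int × Int)), Dom_is_valid_matching edges → Spec_is_valid_matching edges (is_valid_matching edges)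

-- ===== LEMMAS AND PROOFS =====

-- the flat list of per-edge-distinct endpoints
def ivmNodes (edges : List (Int × Int)) : List Int :=
  edges.flatMap (fun e => PySem.Set.ofList [e.1, e.2])

lemma ivm_ofList_pair (u v : Int) :
    PySem.Set.ofList [u, v] = u :: (if v ≠ u then [v] else []) := by
  by_cases h : v = u <;> simp [PySem.Set.ofList, PySem.Set.add, PySem.Set.contains, h]

-- B's nested fold builds the counter of ivmNodes
lemma ivm_counts_eq (edges : List (Int × Int)) (d : PySem.Dict Int Int) :
    edges.foldl (fun counts e =>
      (PySem.Set.ofList [e.1, e.2]).foldl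
        (fun counts node => PySem.Dict.modify counts node 0 (· + 1)) counts) d
    = (ivmNodes edges).foldl (fun counts node => PySem.Dict.modify counts node 0 (· + 1)) d := by
  induction edges generalizing d with
  | nil => simp [ivmNodes]
  | cons e rest ih => simp [ivmNodes, List.foldl_append, ih, List.flatMap_cons]

lemma ivmGoA_iff (edges : List (Int × Int)) (seen : PySem.Set Int) :
    ivmGoA seen edges = true ↔
      (ivmNodes edges).Nodup ∧ ∀ x ∈ ivmNodes edges, x ∉ seen := by
  induction edges generalizing seen with
  | nil => simp [ivmGoA, ivmNodes]
  | cons e rest ih =>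
    obtain ⟨u, v⟩ := e
    have hnodes : ivmNodes ((u, v) :: rest) = (u :: if v ≠ u then [v] else []) ++ ivmNodes rest := by
      simp [ivmNodes, ivm_ofList_pair]
    by_cases hu : u ∈ seen
    · have hcu : PySem.Set.contains seen u = true := (PySem.Set.contains_iff seen u).2 hu
      simp only [ivmGoA, hcu, Bool.true_or]
      constructor
      · intro h; cases h
      · rintro ⟨-, h⟩; exact absurd hu (h u (by simp [hnodes]))
    · by_cases hv : v ∈ seen
      · have hcv : PySem.Set.contains seen v = true := (PySem.Set.contains_iff seen v).2 hv
        simp only [ivmGoA, hcv, Bool.or_true]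
        constructor
        · intro h; cases h
        · rintro ⟨-, h⟩
          by_cases hvu : v = u
          · exact absurd hv (hvu ▸ h u (by simp [hnodes]))
          · exact absurd hv (h v (by simp [hnodes, hvu]))
      · have hcu : PySem.Set.contains seen u = false := by
          cases h : PySem.Set.contains seen u
          · rfl
          · exact absurd ((PySem.Set.contains_iff seen u).1 h) hu
        have hcv : PySem.Set.contains seen v = false := by
          cases h : PySem.Set.contains seen v
          · rfl
          · exact absurd ((PySem.Set.contains_iff seen v).1 h) hv
        simp only [ivmGoA, hcu, hcv]
        rw [if_neg (by simp), ih]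
        have hmem : ∀ x : Int, x ∈ PySem.Set.add (PySem.Set.add seen u) v ↔ x ∈ seen ∨ x = u ∨ x = v := by
          intro x; rw [PySem.Set.mem_add, PySem.Set.mem_add]; tauto
        have hhd : ∀ x : Int, x ∈ (u :: if v ≠ u then [v] else []) ↔ x = u ∨ x = v := by
          intro x; by_cases hvu : v = u
          · subst hvu; simp
          · simp [hvu]
        have hhdnd : (u :: if v ≠ u then [v] else []).Nodup := by
          by_cases hvu : v = u
          · simp [hvu]
          · have huv : ¬ u = v := fun h => hvu h.symm
            simp [hvu, huv]
        rw [hnodes, List.nodup_append]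
        constructor
        · rintro ⟨hn, h⟩
          refine ⟨⟨hhdnd, hn, ?_⟩, ?_⟩
          · intro x hx y hy heq
            subst heq
            rcases (hhd x).1 hx with h1 | h1
            · exact h x hy ((hmem x).2 (Or.inr (Or.inl h1)))
            · exact h x hy ((hmem x).2 (Or.inr (Or.inr h1)))
          · intro x hx
            rw [List.mem_append] at hx
            rcases hx with hx | hx
            · rcases (hhd x).1 hx with rfl | rfl
              · exact hu
              · exact hv
            · exact fun hs => h x hx ((hmem x).2 (Or.inl hs))
        · rintro ⟨⟨-, hn, hd⟩, h⟩
          refine ⟨hn, fun x hx hxm => ?_⟩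
          rcases (hmem x).1 hxm with hs | h1 | h1
          · exact h x (List.mem_append.2 (Or.inr hx)) hs
          · exact hd x ((hhd x).2 (Or.inl h1)) x hx rfl
          · exact hd x ((hhd x).2 (Or.inr h1)) x hx rfl

lemma ivm_alt_iff (edges : List (Int × Int)) :
    is_valid_matching_alt edges = true ↔ (ivmNodes edges).Nodup := by
  unfold is_valid_matching_alt
  rw [ivm_counts_eq, ← PySem.Dict.counter_eq_foldl]
  show ((PySem.Dict.counter (ivmNodes edges)).values.all fun c => decide (c ≤ 1)) = true ↔ (ivmNodes edges).Nodup
  rw [show PySem.Dict.values (PySem.Dict.counter (ivmNodes edges))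
        = (PySem.Dict.items (PySem.Dict.counter (ivmNodes edges))).map (·.2) from rfl]
  rw [PySem.Dict.items_counter]
  simp only [List.map_map, List.all_map, List.all_eq_true, Function.comp]
  rw [List.nodup_iff_count_le_one]
  constructor
  · intro h x
    by_cases hx : x ∈ PySem.Set.ofList (ivmNodes edges)
    · have := h x hx
      simp only [decide_eq_true_eq] at this
      exact_mod_cast this
    · have : x ∉ ivmNodes edges := fun hm => hx ((PySem.Set.mem_ofList _ _).2 hm)
      simp [List.count_eq_zero_of_not_mem this]
  · intro h x _
    simp only [decide_eq_true_eq]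
    exact_mod_cast h x

-- ===== VERDICT (by name: the statement is the Claim_ definition above) =====
theorem is_valid_matching_spec : Claim_equal_is_valid_matching := by
  intro edges _
  unfold Spec_is_valid_matching
  have ha := ivmGoA_iff edges PySem.Set.empty
  have hb := ivm_alt_iff edges
  simp only [PySem.Set.empty, List.not_mem_nil, not_false_iff, implies_true, and_true] at ha
  unfold is_valid_matching
  cases h : ivmGoA PySem.Set.empty edges <;>
    cases h' : is_valid_matching_alt edges <;> simp_all
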